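-- pv_equiv track=rewrite | github.com/jfoste81/NinerPath | backend/main.py | _best_credit_subset_dp
-- ===== SOURCE A (Python) =====
-- def _best_credit_subset_dp(course_dicts: list, cap: int) -> list:
--     """0/1 knapsack: max credits <= cap (for larger required pools)."""
--     n = len(course_dicts)
--     if n == 0 or cap <= 0:
--         return []
--     dp = [[0] * (cap + 1) for _ in range(n + 1)]
--     take = [[False] * (cap + 1) for _ in range(n + 1)]
--     for i in range(1, n + 1):
--         w = course_dicts[i - 1]["credits"]
--         for c in range(cap + 1):
--             dp[i][c] = dp[i - 1][c]
--             if c >= w: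
--                 with_w = dp[i - 1][c - w] + w
--                 if with_w > dp[i][c]:
--                     dp[i][c] = with_w
--                     take[i][c] = True
--     best_c = max(range(cap + 1), key=lambda c: (dp[n][c], c))
--     res = []
--     c = best_c
--     for i in range(n, 0, -1):
--         if take[i][c]:
--             res.append(course_dicts[i - 1])
--             c -= course_dicts[i - 1]["credits"]
--     return res[::-1]
-- ===== SOURCE B (Python) =====
-- def _best_credit_subset_dp(course_dicts: list, cap: int) -> list:
--     """0/1 knapsack via top-down recursion best(i, c) with a memo table,
--     reconstructing the chosen subset front-to-back (no table of rows, no reverse)."""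
--     n = len(course_dicts)
--     if n == 0 or cap <= 0:
--         return []
--     memo = {}
--
--     def best(i, c):
--         # max credits achievable from the first i courses within budget c
--         if i == 0:
--             return 0
--         key = (i, c)
--         if key in memo:
--             return memo[key]
--         w = course_dicts[i - 1]["credits"]
--         b = best(i - 1, c)
--         if c >= w:
--             t = best(i - 1, c - w) + w
--             if t > b:
--                 b = t
--         memo[key] = b
--         return b
--
--     def pick(i, c):
--         # courses chosen by the strictly-greater rule, in original order
--         if i == 0:
--             return []
--         w = course_dicts[i - 1]["credits"]
--         if c >= w and best(i - 1, c - w) + w > best(i - 1, c):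
--             return pick(i - 1, c - w) + [course_dicts[i - 1]]
--         return pick(i - 1, c)
--
--     return pick(n, cap)
-- ===== Notes on version B (the rewrite author's own statement) =====
-- stated objective: alternative
-- what changed: Bottom-up table fill plus max-scan for the start column and backward append-then-reverse reconstruction is replaced by a top-down memoized recursion best(i,c) that only visits reachable states, reconstructing the subset front-to-back directly in original order from (n, cap) (cap is provably the column A's max-scan picks, since the dp row is nondecreasing with the index as tie-break).
import Mathlib
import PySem

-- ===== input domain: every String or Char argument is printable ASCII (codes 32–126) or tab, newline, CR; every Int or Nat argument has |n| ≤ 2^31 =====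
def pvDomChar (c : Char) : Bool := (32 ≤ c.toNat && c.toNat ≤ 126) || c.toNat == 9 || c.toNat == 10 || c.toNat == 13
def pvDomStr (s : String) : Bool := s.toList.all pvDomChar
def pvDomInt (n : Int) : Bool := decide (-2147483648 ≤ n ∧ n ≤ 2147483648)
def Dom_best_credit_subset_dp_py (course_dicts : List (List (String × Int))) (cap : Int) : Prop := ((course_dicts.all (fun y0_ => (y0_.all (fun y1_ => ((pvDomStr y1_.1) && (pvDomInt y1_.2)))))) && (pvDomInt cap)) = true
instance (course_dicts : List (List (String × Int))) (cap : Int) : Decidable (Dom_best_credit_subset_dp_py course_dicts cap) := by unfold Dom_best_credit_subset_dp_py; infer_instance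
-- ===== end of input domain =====

-- B replaces A's bottom-up table fill + max-scan for the start column + backward append/reverse
-- reconstruction by a top-down recursion best(i,c) from (n, cap) with front-to-back reconstruction.

-- ===== PORT A =====
-- d["credits"]: first-match lookup, total via getD 0 — exact under Pre_ (key present).  Used by both ports.
def credOf (d : List (String × Int)) : Int := PySem.Dict.getD (PySem.Dict.mk d) "credits" 0

-- A's inner loop body for one cell c: dp[i][c] = dp[i-1][c]; if c >= w: with_w = dp[i-1][c-w] + w; take if strictly greater
def entryA (prev : List Int) (w : Int) (c : Int) : Int × Bool :=
  let base := PySem.List.pyGetD prev c 0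
  if w ≤ c then
    let withW := PySem.List.pyGetD prev (c - w) 0 + w
    if base < withW then (withW, true) else (base, false)
  else (base, false)

-- one iteration of A's outer loop: row i of dp and of take from row i-1 of dp
def stepA (prev : List Int) (w : Int) (cap : Int) : List Int × List Bool :=
  let row := (PySem.List.pyRange 0 (cap + 1) 1).map (fun c => entryA prev w c)
  (row.map Prod.fst, row.map Prod.snd)

-- A's outer loop over i = 1..n: rows 1..n of dp and take.  (Python preallocates zero rows and
-- overwrites row i in iteration i reading only row i-1, so building the rows one by one is the same
-- loop; row 0 of take is all-False and never read by the reconstruction, which walks i = n..1.)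
def tablesA : List (List (String × Int)) → List Int → Int → List (List Int × List Bool)
  | [], _, _ => []
  | d :: rest, prev, cap =>
      let pr := stepA prev (credOf d) cap
      pr :: tablesA rest pr.1 cap

-- Python tuple comparison (a, b) > (c, d), written out lexicographically
def keyGtA (x y : Int × Int) : Bool := decide (y.1 < x.1 ∨ (x.1 = y.1 ∧ y.2 < x.2))

def best_credit_subset_dp_py (course_dicts : List (List (String × Int))) (cap : Int) : List (List (String × Int)) :=
  let n := course_dicts.length
  if n = 0 ∨ cap ≤ 0 then [] else
    let row0 : List Int := List.replicate (cap + 1).toNat 0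
    let tables := tablesA course_dicts row0 cap
    let dpn := (tables.getD (n - 1) ([], [])).1
    let key : Int → Int × Int := fun c => (PySem.List.pyGetD dpn c 0, c)
    -- max(range(cap+1), key=…): start from the first element 0 (cap ≥ 1 in this branch, so the
    -- range is 0 :: …) and replace only on strictly greater key — Python's max rule
    let best_c := (PySem.List.pyRange 1 (cap + 1) 1).foldl (fun b c => if keyGtA (key c) (key b) then c else b) 0
    let st := (PySem.List.pyRange (n : Int) 0 (-1)).foldl
      (fun (st : Int × List (List (String × Int))) i =>
        let tk := PySem.List.pyGetD (PySem.List.pyGetD (tables.map Prod.snd) (i - 1) []) st.1 false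
        if tk then
          let d := PySem.List.pyGetD course_dicts (i - 1) []
          (st.1 - credOf d, st.2 ++ [d])
        else st)
      (best_c, ([] : List (List (String × Int))))
    st.2.reverse

-- ===== PORT B =====
-- best(i, c): max credits from the first i courses within budget c.  (Source B's memo is a pure cache:
-- the recursion computes the same values, so it is ported as the plain recursion.)
def bestB (course_dicts : List (List (String × Int))) : Nat → Int → Int
  | 0, _ => 0
  | i + 1, c =>
      let w := credOf (course_dicts.getD i [])
      let b := bestB course_dicts i c
      if w ≤ c then
        let t := bestB course_dicts i (c - w) + w
        if b < t then t else b
      else b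

-- pick(i, c): chosen courses in original order, strictly-greater take rule
def pickB (course_dicts : List (List (String × Int))) : Nat → Int → List (List (String × Int))
  | 0, _ => []
  | i + 1, c =>
      let d := course_dicts.getD i []
      let w := credOf d
      if w ≤ c ∧ bestB course_dicts i c < bestB course_dicts i (c - w) + w then
        pickB course_dicts i (c - w) ++ [d]
      else pickB course_dicts i c

def best_credit_subset_dp_py_alt (course_dicts : List (List (String × Int))) (cap : Int) : List (List (String × Int)) :=
  if course_dicts.length = 0 ∨ cap ≤ 0 then [] else pickB course_dicts course_dicts.length cap

-- ===== PRECONDITION & SPEC =====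
-- Pre_ excludes exactly the inputs on which A raises: when the knapsack actually runs (nonempty
-- list, cap > 0), every course dict must have a "credits" key (else KeyError) with a nonnegative
-- value (a negative credit makes A index dp[i-1][c-w] past the row end: IndexError).
def Pre_best_credit_subset_dp_py (course_dicts : List (List (String × Int))) (cap : Int) : Prop :=
  course_dicts = [] ∨ cap ≤ 0 ∨
    ∀ d ∈ course_dicts, ((PySem.Dict.get? (PySem.Dict.mk d) "credits").any (fun w => decide (0 ≤ w))) = true
instance (course_dicts : List (List (String × Int))) (cap : Int) : Decidable (Pre_best_credit_subset_dp_py course_dicts cap) := by unfold Pre_best_credit_subset_dp_py; infer_instance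
def pvWitness_best_credit_subset_dp_py : (List (List (String × Int))) × Int := ([[("credits", 3)], [("credits", 2)]], 4)

def Spec_best_credit_subset_dp_py (course_dicts : List (List (String × Int))) (cap : Int) (out : List (List (String × Int))) : Prop := out = best_credit_subset_dp_py_alt course_dicts cap
instance (course_dicts : List (List (String × Int))) (cap : Int) (out : List (List (String × Int))) : Decidable (Spec_best_credit_subset_dp_py course_dicts cap out) := by unfold Spec_best_credit_subset_dp_py; infer_instance

-- ===== CLAIM (what is proved, stated in full; the proofs are below) =====
def Claim_equal_best_credit_subset_dp_py : Prop := ∀ (course_dicts : List (List (String × Int))) (cap : Int), Dom_best_credit_subset_dp_py course_dicts cap → Pre_best_credit_subset_dp_py course_dicts cap → Spec_best_credit_subset_dp_py course_dicts cap (best_credit_subset_dp_py course_dicts cap)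

-- ===== LEMMAS AND PROOFS =====

-- every weight the loops read is nonnegative (incl. the out-of-range default credOf [] = 0)
theorem wNonneg (cds : List (List (String × Int)))
    (hok : ∀ d ∈ cds, ((PySem.Dict.get? (PySem.Dict.mk d) "credits").any (fun w => decide (0 ≤ w))) = true)
    (i : Nat) : 0 ≤ credOf (cds.getD i []) := by
  by_cases h : i < cds.length
  · have hm : cds.getD i [] ∈ cds := by
      rw [List.getD_eq_getElem _ _ h]; exact List.getElem_mem h
    have := hok _ hm
    unfold credOf
    rw [PySem.Dict.getD_eq_get?_getD]
    cases hg : PySem.Dict.get? (PySem.Dict.mk (cds.getD i [])) "credits" with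
    | none => simp
    | some w => rw [hg] at this; simpa using this
  · rw [List.getD_eq_default _ _ (by omega)]
    decide

-- bestB is monotone in the budget (needs nonnegative weights)
theorem bestB_mono (cds : List (List (String × Int)))
    (hw : ∀ i, 0 ≤ credOf (cds.getD i [])) :
    ∀ (i : Nat) (c c' : Int), c ≤ c' → bestB cds i c ≤ bestB cds i c' := by
  intro i
  induction i with
  | zero => intro c c' h; simp [bestB]
  | succ i ih =>
      intro c c' h
      have h1 := ih c c' h
      have h2 := ih (c - credOf (cds.getD i [])) (c' - credOf (cds.getD i [])) (by omega)
      have hwi := hw i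
      simp only [bestB]
      split_ifs <;> omega

-- A's dp row for level i, as the map over the column range
def dpRowOf (cds : List (List (String × Int))) (cap : Int) (i : Nat) : List Int :=
  (PySem.List.pyRange 0 (cap + 1) 1).map (fun c => bestB cds i c)
-- the take flag of table row i+1 at column c
def condB (cds : List (List (String × Int))) (i : Nat) (c : Int) : Bool :=
  decide (credOf (cds.getD i []) ≤ c ∧
    bestB cds i c < bestB cds i (c - credOf (cds.getD i [])) + credOf (cds.getD i []))
def tkRowOf (cds : List (List (String × Int))) (cap : Int) (i : Nat) : List Bool :=
  (PySem.List.pyRange 0 (cap + 1) 1).map (fun c => condB cds i c)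

theorem entryA_char (cds : List (List (String × Int))) (cap : Int)
    (hw : ∀ i, 0 ≤ credOf (cds.getD i [])) (i : Nat) (c : Int) (h0 : 0 ≤ c) (h1 : c < cap + 1) :
    entryA (dpRowOf cds cap i) (credOf (cds.getD i [])) c = (bestB cds (i + 1) c, condB cds i c) := by
  have hwi := hw i
  unfold entryA dpRowOf
  rw [PySem.List.pyGetD_map_pyRange_of_nonneg _ _ _ _ h0 (by omega)]
  by_cases hcw : credOf (cds.getD i []) ≤ c
  · rw [if_pos hcw]
    rw [PySem.List.pyGetD_map_pyRange_of_nonneg _ _ _ _ (by omega) (by omega)]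
    simp only [bestB, condB]
    by_cases hlt : bestB cds i c < bestB cds i (c - credOf (cds.getD i [])) + credOf (cds.getD i [])
    · rw [if_pos hcw, decide_eq_true ⟨hcw, hlt⟩]; simp only [if_pos hlt]
    · rw [if_pos hcw, decide_eq_false (fun h => hlt h.2)]; simp only [if_neg hlt]
  · rw [if_neg hcw]
    simp only [bestB, condB]
    rw [if_neg hcw, decide_eq_false (fun h => hcw h.1)]

theorem stepA_char (cds : List (List (String × Int))) (cap : Int)
    (hw : ∀ i, 0 ≤ credOf (cds.getD i [])) (i : Nat) :
    stepA (dpRowOf cds cap i) (credOf (cds.getD i [])) cap = (dpRowOf cds cap (i + 1), tkRowOf cds cap i) := by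
  unfold stepA
  have hrow : (PySem.List.pyRange 0 (cap + 1) 1).map (fun c => entryA (dpRowOf cds cap i) (credOf (cds.getD i [])) c)
      = (PySem.List.pyRange 0 (cap + 1) 1).map (fun c => (bestB cds (i + 1) c, condB cds i c)) := by
    apply List.map_congr_left
    intro c hc
    rw [PySem.List.mem_pyRange_one] at hc
    exact entryA_char cds cap hw i c hc.1 hc.2
  rw [hrow]
  simp [dpRowOf, tkRowOf, List.map_map, Function.comp]

theorem tablesA_char (cds : List (List (String × Int))) (cap : Int)
    (hw : ∀ i, 0 ≤ credOf (cds.getD i [])) :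
    ∀ (suf : List (List (String × Int))) (k : Nat), cds.drop k = suf →
    tablesA suf (dpRowOf cds cap k) cap
      = (List.range suf.length).map (fun j => (dpRowOf cds cap (k + j + 1), tkRowOf cds cap (k + j))) := by
  intro suf
  induction suf with
  | nil => intro k _; simp [tablesA]
  | cons d rest ih =>
      intro k hdrop
      have hk : k < cds.length := by
        by_contra h
        rw [List.drop_eq_nil_of_le (by omega)] at hdrop
        exact (List.cons_ne_nil _ _) hdrop.symm
      have hd : d = cds.getD k [] := by
        have := List.drop_eq_getElem_cons hk
        rw [hdrop] at this
        rw [List.getD_eq_getElem _ _ hk]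
        exact (List.cons.injEq _ _ _ _ ▸ this).1
      have hrest : cds.drop (k + 1) = rest := by
        have := List.drop_eq_getElem_cons hk
        rw [hdrop] at this
        exact ((List.cons.injEq _ _ _ _ ▸ this).2).symm
      show (let pr := stepA (dpRowOf cds cap k) (credOf d) cap; pr :: tablesA rest pr.1 cap) = _
      rw [hd, stepA_char cds cap hw k]
      simp only []
      rw [ih (k + 1) hrest]
      simp only [List.length_cons, List.range_succ_eq_map, List.map_cons, List.map_map]
      refine congrArg₂ _ (by norm_num) ?_
      apply List.map_congr_left
      intro j _
      simp only [Function.comp]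
      congr 2 <;> omega

-- the result of a keep-or-replace fold is the seed or one of the scanned elements
theorem foldl_choice_mem {α : Type} (p : α → α → Bool) :
    ∀ (l : List α) (a : α), l.foldl (fun b c => if p b c then c else b) a ∈ a :: l := by
  intro l
  induction l with
  | nil => intro a; simp
  | cons x xs ih =>
      intro a
      simp only [List.foldl_cons]
      by_cases hp : p a x
      · rw [if_pos hp]
        exact List.mem_cons_of_mem a (ih x)
      · rw [if_neg hp]
        have h := ih a
        simp [List.mem_cons] at h ⊢
        tauto

theorem row0_eq (cds : List (List (String × Int))) (cap : Int) :
    List.replicate (cap + 1).toNat 0 = dpRowOf cds cap 0 := by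
  unfold dpRowOf
  have : (fun c : Int => bestB cds 0 c) = fun _ => (0 : Int) := by
    funext c; simp [bestB]
  rw [this, List.map_const', PySem.List.length_pyRange_one]
  norm_num

-- A's max-scan returns cap: the dp row is nondecreasing (bestB_mono) and the index breaks ties
theorem bestc_eq (cds : List (List (String × Int))) (cap : Int)
    (hw : ∀ i, 0 ≤ credOf (cds.getD i [])) (hcap : 1 ≤ cap) (n : Nat) :
    (PySem.List.pyRange 1 (cap + 1) 1).foldl
      (fun b c => if keyGtA (PySem.List.pyGetD (dpRowOf cds cap n) c 0, c)
                          (PySem.List.pyGetD (dpRowOf cds cap n) b 0, b) then c else b) 0 = cap := by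
  rw [PySem.List.pyRange_one_append 1 cap (cap + 1) (by omega) (by omega),
      PySem.List.pyRange_one_singleton, List.foldl_append]
  simp only [List.foldl_cons, List.foldl_nil]
  set b0 := (PySem.List.pyRange 1 cap 1).foldl
      (fun b c => if keyGtA (PySem.List.pyGetD (dpRowOf cds cap n) c 0, c)
                          (PySem.List.pyGetD (dpRowOf cds cap n) b 0, b) then c else b) 0 with hb0def
  have hb0 : b0 ∈ (0 : Int) :: PySem.List.pyRange 1 cap 1 := foldl_choice_mem _ _ _
  have hb0b : 0 ≤ b0 ∧ b0 < cap := by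
    rcases List.mem_cons.mp hb0 with h | h
    · omega
    · rw [PySem.List.mem_pyRange_one] at h; omega
  have e1 : PySem.List.pyGetD (dpRowOf cds cap n) cap 0 = bestB cds n cap := by
    unfold dpRowOf
    rw [PySem.List.pyGetD_map_pyRange_of_nonneg _ _ _ _ (by omega) (by omega)]
  have e2 : PySem.List.pyGetD (dpRowOf cds cap n) b0 0 = bestB cds n b0 := by
    unfold dpRowOf
    rw [PySem.List.pyGetD_map_pyRange_of_nonneg _ _ _ _ (by omega) (by omega)]
  have hmono := bestB_mono cds hw n b0 cap (by omega)
  have hkey : keyGtA (PySem.List.pyGetD (dpRowOf cds cap n) cap 0, cap)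
      (PySem.List.pyGetD (dpRowOf cds cap n) b0 0, b0) = true := by
    rw [e1, e2]
    unfold keyGtA
    exact decide_eq_true (by omega)
  rw [if_pos hkey]

-- remaining budget after the reconstruction walks rows k..1 (proof bookkeeping only)
def cAfter (cds : List (List (String × Int))) : Nat → Int → Int
  | 0, c => c
  | i + 1, c =>
      let w := credOf (cds.getD i [])
      if w ≤ c ∧ bestB cds i c < bestB cds i (c - w) + w then cAfter cds i (c - w) else cAfter cds i c

-- A's backward reconstruction fold appends exactly pickB's choices in reverse
theorem recon_eq (cds : List (List (String × Int))) (cap : Int)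
    (hw : ∀ i, 0 ≤ credOf (cds.getD i [])) :
    ∀ (k : Nat) (c : Int) (acc : List (List (String × Int))), 0 ≤ c → c ≤ cap → k ≤ cds.length →
    (PySem.List.pyRange (k : Int) 0 (-1)).foldl
      (fun (st : Int × List (List (String × Int))) i =>
        let tk := PySem.List.pyGetD
          (PySem.List.pyGetD ((List.range cds.length).map (fun j => tkRowOf cds cap j)) (i - 1) []) st.1 false
        if tk then
          let d := PySem.List.pyGetD cds (i - 1) []
          (st.1 - credOf d, st.2 ++ [d])
        else st) (c, acc)
      = (cAfter cds k c, acc ++ (pickB cds k c).reverse) := by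
  intro k
  induction k with
  | zero =>
      intro c acc h0 h1 _
      rw [PySem.List.pyRange_neg_one_eq_nil (by norm_num)]
      simp [pickB, cAfter]
  | succ k ih =>
      intro c acc h0 h1 hk
      rw [PySem.List.pyRange_neg_one_cons (by push_cast; omega), List.foldl_cons]
      have hi1 : ((k + 1 : Nat) : Int) - 1 = (k : Int) := by push_cast; omega
      simp only [hi1]
      have htkrow : PySem.List.pyGetD ((List.range cds.length).map (fun j => tkRowOf cds cap j)) (k : Int) []
          = tkRowOf cds cap k := by
        rw [PySem.List.pyGetD_natCast, List.getD_eq_getElem?_getD, List.getElem?_map,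
            List.getElem?_range (by omega)]
        rfl
      have hd : PySem.List.pyGetD cds (k : Int) [] = cds.getD k [] := PySem.List.pyGetD_natCast ..
      simp only [htkrow, hd]
      have htk : PySem.List.pyGetD (tkRowOf cds cap k) c false = condB cds k c := by
        unfold tkRowOf
        rw [PySem.List.pyGetD_map_pyRange_of_nonneg _ _ _ _ h0 (by omega)]
      simp only [htk]
      by_cases hc : credOf (cds.getD k []) ≤ c ∧
          bestB cds k c < bestB cds k (c - credOf (cds.getD k [])) + credOf (cds.getD k [])
      · rw [show condB cds k c = true from decide_eq_true hc]
        simp only [if_pos]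
        rw [ih (c - credOf (cds.getD k [])) (acc ++ [cds.getD k []]) (by omega) (by have := hw k; omega) (by omega)]
        simp only [pickB, cAfter, if_pos hc]
        simp [List.append_assoc]
      · rw [show condB cds k c = false from decide_eq_false hc]
        simp only [Bool.false_eq_true, if_false]
        rw [ih c acc h0 h1 (by omega)]
        simp only [pickB, cAfter, if_neg hc]

theorem main_eq (cds : List (List (String × Int))) (cap : Int)
    (hok : ∀ d ∈ cds, ((PySem.Dict.get? (PySem.Dict.mk d) "credits").any (fun w => decide (0 ≤ w))) = true) :
    best_credit_subset_dp_py cds cap = best_credit_subset_dp_py_alt cds cap := by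
  by_cases hg : cds.length = 0 ∨ cap ≤ 0
  · simp only [best_credit_subset_dp_py, best_credit_subset_dp_py_alt, if_pos hg]
  · have hw : ∀ i, 0 ≤ credOf (cds.getD i []) := wNonneg cds hok
    have hcap : 1 ≤ cap := by omega
    have hn : 0 < cds.length := by omega
    simp only [best_credit_subset_dp_py, best_credit_subset_dp_py_alt, if_neg hg]
    rw [row0_eq cds cap, tablesA_char cds cap hw cds 0 (by simp)]
    simp only [Nat.zero_add]
    have hget : ((List.range cds.length).map (fun j => (dpRowOf cds cap (j + 1), tkRowOf cds cap j))).getD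
        (cds.length - 1) ([], []) = (dpRowOf cds cap cds.length, tkRowOf cds cap (cds.length - 1)) := by
      rw [List.getD_eq_getElem?_getD, List.getElem?_map, List.getElem?_range (by omega)]
      simp only [Option.map_some, Option.getD_some]
      congr 2
      omega
    rw [hget]
    have hsnd : ((List.range cds.length).map (fun j => (dpRowOf cds cap (j + 1), tkRowOf cds cap j))).map Prod.snd
        = (List.range cds.length).map (fun j => tkRowOf cds cap j) := by
      rw [List.map_map]; rfl
    rw [hsnd]
    simp only []
    rw [bestc_eq cds cap hw hcap cds.length]
    rw [recon_eq cds cap hw cds.length cap [] (by omega) le_rfl le_rfl]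
    simp

-- ===== VERDICT (by name: the statement is the Claim_ definition above) =====
theorem best_credit_subset_dp_py_spec : Claim_equal_best_credit_subset_dp_py := by
  intro cds cap _ hpre
  unfold Spec_best_credit_subset_dp_py
  rcases hpre with h | h | h
  · subst h
    simp [best_credit_subset_dp_py, best_credit_subset_dp_py_alt]
  · simp [best_credit_subset_dp_py, best_credit_subset_dp_py_alt, if_pos (Or.inr h)]
  · exact main_eq cds cap h
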